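-- pv_equiv track=rewrite | github.com/sawogus29/nlp-demo | components/mwe.py | validate_iob
-- ===== SOURCE A (Python) =====
-- def validate_iob(iobs):
--     valid_iobs = []
--     buffer = []
--     prev = 'O'
--     buffer_mode = False
--
--     valid_after = {
--         'O': ['B', 'O', '0'],
--         'B': ['I', 'o', 'b'],
--         'I': ['I', 'o', 'b', 'O'],
--         'o': ['I', 'b', 'i'],
--         'b': ['I', 'i', 'o'],
--         'i': ['i', 'o', 'I'],
--         '0': ['O']
--     }
--     for tag in iobs + ['O']:
--         ############Pre#################
--         is_valid = tag in valid_after[prev]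
--         #0
--         if not buffer_mode and is_valid:
--             pass
--
--         if not buffer_mode and not is_valid:
--             valid_iobs.append('O')
--             prev = 'O'
--             continue
--
--         #1
--         if buffer_mode and not is_valid:
--             # buffer overwrite
--             valid_iobs += ['O'] * len(buffer)
--             buffer = []
--
--         #2
--         is_end = tag in ('B', 'O')
--         if buffer_mode and is_valid and is_end:
--             # buffer flush
--             valid_iobs += buffer
--             buffer = []
--
--         if buffer_mode and is_valid and not is_end:
--             buffer.append(tag)
--             prev = tag
--             continue
--
--         ############Post#################
--         #0
--         if not buffer_mode and is_valid:
--             if tag == 'B':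
--                 buffer_mode = True
--                 buffer.append(tag)
--             else:
--                 valid_iobs.append(tag)
--             prev = tag
--             continue
--
--         #1
--         if buffer_mode and not is_valid:
--             if tag == 'B':
--                 buffer_mode = True
--                 buffer.append(tag)
--                 prev = tag
--                 continue
--             else:
--                 buffer_mode = False
--                 valid_iobs.append(tag)
--                 prev = 'O'
--                 continue
--
--         #2
--         if buffer_mode and is_valid and is_end:
--             if tag == 'B':
--                 buffer_mode = True
--                 buffer.append(tag)
--                 prev = tag
--                 continue
--             else:
--                 buffer_mode = False
--                 valid_iobs.append(tag)
--                 prev = tag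
--                 continue
--
--     if len(valid_iobs) > len(iobs):
--         assert len(valid_iobs) == len(iobs)+1
--         valid_iobs = valid_iobs[:-1]
--
--     return valid_iobs
-- ===== SOURCE B (Python) =====
-- # B: two-phase chunk decomposition -- an outer scan that, on a valid 'B', hands
-- # off to an inner scan consuming the whole maximal run, then emits the run
-- # verbatim (valid close) or as 'O'*len(run) (invalid close) at its boundary,
-- # instead of A's single state machine carrying a buffer list and a buffer_mode
-- # flag through every tag plus a sentinel/trim pass.
--
-- VALID = {
--     'O': ('B', 'O', '0'),
--     'B': ('I', 'o', 'b'),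
--     'I': ('I', 'o', 'b', 'O'),
--     'o': ('I', 'b', 'i'),
--     'b': ('I', 'i', 'o'),
--     'i': ('i', 'o', 'I'),
--     '0': ('O',),
-- }
--
--
-- def validate_iob(iobs):
--     out = []
--     prev = 'O'
--     i = 0
--     n = len(iobs)
--     while i < n:
--         t = iobs[i]
--         if t not in VALID[prev]:
--             out.append('O')
--             prev = 'O'
--             i += 1
--         elif t != 'B':
--             out.append(t)
--             prev = t
--             i += 1
--         else:
--             # consume the maximal run: 'B' then valid non-boundary tags
--             run = ['B']
--             p = 'B'
--             j = i + 1
--             while j < n and iobs[j] in VALID[p] and iobs[j] not in ('B', 'O'):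
--                 p = iobs[j]
--                 run.append(p)
--                 j += 1
--             if j == n:
--                 # input ends inside the run
--                 out += run if p == 'I' else ['O'] * len(run)
--                 prev = 'O'
--                 i = j
--             else:
--                 t2 = iobs[j]
--                 if t2 in VALID[p]:       # run closes validly -> flush it
--                     out += run
--                     if t2 == 'B':
--                         prev = 'O'       # boundary 'B' starts the next run
--                         i = j
--                     else:                # t2 == 'O'
--                         out.append('O')
--                         prev = 'O'
--                         i = j + 1
--                 else:                    # run dies -> 'O' it out
--                     out += ['O'] * len(run)
--                     if t2 == 'B':
--                         prev = 'O'       # a fresh run starts at the boundary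
--                         i = j
--                     else:
--                         out.append(t2)
--                         prev = 'O'
--                         i = j + 1
--     return out
-- ===== Notes on version B (the rewrite author's own statement) =====
-- stated objective: alternative
-- what changed: Replaces A's single-pass state machine (buffer list + buffer_mode flag threaded through every tag, plus an 'O' sentinel and a final trim) by a two-level chunk decomposition: an outer scan that emits standalone tags directly and, on a valid 'B', hands off to an inner scan that consumes the whole maximal run and emits it verbatim or as 'O'*len(run) at its boundary, with no sentinel and no trim.
import Mathlib
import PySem

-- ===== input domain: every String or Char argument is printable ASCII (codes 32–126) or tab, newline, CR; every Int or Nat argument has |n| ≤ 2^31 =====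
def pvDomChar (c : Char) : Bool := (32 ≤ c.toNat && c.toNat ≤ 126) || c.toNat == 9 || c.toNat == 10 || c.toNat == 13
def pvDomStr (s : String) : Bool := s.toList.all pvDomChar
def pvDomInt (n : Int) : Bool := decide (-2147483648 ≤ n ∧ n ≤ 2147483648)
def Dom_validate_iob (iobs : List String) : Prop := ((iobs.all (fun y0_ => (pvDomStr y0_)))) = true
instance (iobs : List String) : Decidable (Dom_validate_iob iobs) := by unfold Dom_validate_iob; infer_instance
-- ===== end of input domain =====

-- B replaces A's one-pass buffer/buffer_mode state machine (with 'O' sentinel and final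
-- trim) by a chunk decomposition: an outer scan plus an inner scan that consumes each
-- maximal 'B'-run and emits it verbatim or as 'O'-s at its boundary.  Objective: alternative.

-- ===== PORT A =====
-- the literal `valid_after` dict of A (B's Python carries the same table as tuples)
def pyValidAfter : PySem.Dict String (List String) :=
  PySem.Dict.ofList
    [("O", ["B", "O", "0"]), ("B", ["I", "o", "b"]), ("I", ["I", "o", "b", "O"]),
     ("o", ["I", "b", "i"]), ("b", ["I", "i", "o"]), ("i", ["i", "o", "I"]), ("0", ["O"])]

-- `tag in valid_after[prev]`; `prev` is always a key of the table in both programs,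
-- so getD's default is never consulted (Python never raises here)
def pvValid (prev tag : String) : Bool :=
  (PySem.Dict.getD pyValidAfter prev []).contains tag

-- one iteration of A's loop body on state (valid_iobs, buffer, prev, buffer_mode)
def stepA (st : List String × List String × String × Bool) (tag : String) :
    List String × List String × String × Bool :=
  match st with
  | (acc, buf, prev, bm) =>
    let isValid := pvValid prev tag
    if !bm && !isValid then (acc ++ ["O"], buf, "O", bm)       -- append 'O'; continue
    else
      -- #1 buffer overwrite
      let acc1 := if bm && !isValid then acc ++ List.replicate buf.length "O" else acc
      let buf1 := if bm && !isValid then [] else buf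
      let isEnd := tag == "B" || tag == "O"
      -- #2 buffer flush
      let acc2 := if bm && isValid && isEnd then acc1 ++ buf1 else acc1
      let buf2 := if bm && isValid && isEnd then [] else buf1
      if bm && isValid && !isEnd then (acc2, buf2 ++ [tag], tag, bm)
      else if !bm && isValid then
        if tag == "B" then (acc2, buf2 ++ [tag], tag, true)
        else (acc2 ++ [tag], buf2, tag, bm)
      else if bm && !isValid then
        if tag == "B" then (acc2, buf2 ++ [tag], tag, bm)
        else (acc2 ++ [tag], buf2, "O", false)
      else  -- bm && isValid && isEnd
        if tag == "B" then (acc2, buf2 ++ [tag], tag, bm)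
        else (acc2 ++ [tag], buf2, tag, false)

def validate_iob (iobs : List String) : List String :=
  match (iobs ++ ["O"]).foldl stepA ([], [], "O", false) with
  | (acc, _, _, _) =>
    -- `valid_iobs[:-1]` on a list of length > len(iobs) ≥ 0 is dropLast (exact);
    -- the assert holds on every run (the final acc always has length len(iobs)+1)
    if acc.length > iobs.length then acc.dropLast else acc

-- ===== PORT B =====
-- inner while loop of Source B: consume the valid, non-boundary tail of a run;
-- returns (consumed tail, remaining tags, final prev of the run)
def scanB (p : String) (tags : List String) : List String × List String × String :=
  match tags with
  | [] => ([], [], p)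
  | t :: rest =>
    if pvValid p t && !(t == "B" || t == "O") then
      match scanB t rest with
      | (tail, r, pe) => (t :: tail, r, pe)
    else ([], t :: rest, p)

theorem scanB_len (p : String) (tags : List String) :
    (scanB p tags).2.1.length ≤ tags.length := by
  induction tags generalizing p with
  | nil => simp [scanB]
  | cons t rest ih =>
    simp only [scanB]
    split
    · have := ih t
      rcases h : scanB t rest with ⟨tail, r, pe⟩
      rw [h] at this
      simpa [h] using Nat.le_succ_of_le this
    · simp

-- outer while loop of Source B (recursion on the remaining suffix of iobs)
def goB (prev : String) (tags : List String) : List String :=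
  match tags with
  | [] => []
  | t :: rest =>
    if !pvValid prev t then "O" :: goB "O" rest
    else if t != "B" then t :: goB t rest
    else
      match h : scanB "B" rest with
      | (tail, [], p) =>
        let run := "B" :: tail
        if p == "I" then run else List.replicate run.length "O"
      | (tail, t2 :: rest3, p) =>
        let run := "B" :: tail
        if pvValid p t2 then
          if t2 == "B" then run ++ goB "O" (t2 :: rest3)
          else run ++ "O" :: goB "O" rest3
        else
          if t2 == "B" then List.replicate run.length "O" ++ goB "O" (t2 :: rest3)
          else List.replicate run.length "O" ++ t2 :: goB "O" rest3
termination_by tags.length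
decreasing_by
  all_goals (have := scanB_len "B" rest; simp_all)
  all_goals omega

def validate_iob_alt (iobs : List String) : List String := goB "O" iobs

-- ===== PRECONDITION & SPEC =====
def Spec_validate_iob (iobs : List String) (out : List String) : Prop := out = validate_iob_alt iobs
instance (iobs : List String) (out : List String) : Decidable (Spec_validate_iob iobs out) := by unfold Spec_validate_iob; infer_instance

-- ===== CLAIM (what is proved, stated in full; the proofs are below) =====
def Claim_equal_validate_iob : Prop := ∀ (iobs : List String), Dom_validate_iob iobs → Spec_validate_iob iobs (validate_iob iobs)

-- ===== LEMMAS AND PROOFS =====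

-- effect of A's trailing 'O' sentinel + trim, read off a pre-sentinel state
def finRun (st : List String × List String × String × Bool) : List String :=
  match st with
  | (acc, buf, p, bm) =>
    if bm then
      if pvValid p "O" then acc ++ buf else acc ++ List.replicate buf.length "O"
    else acc

-- what A's buffered mode produces from state (buf, p) on the remaining tags,
-- phrased through B's run scanner
def bmOut (p : String) (buf : List String) (rest : List String) : List String :=
  match scanB p rest with
  | (tail, [], pe) =>
      if pvValid pe "O" then buf ++ tail
      else List.replicate (buf ++ tail).length "O"
  | (tail, t2 :: rest3, pe) =>
      if pvValid pe t2 then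
        if t2 == "B" then (buf ++ tail) ++ goB "O" (t2 :: rest3)
        else (buf ++ tail) ++ "O" :: goB "O" rest3
      else
        if t2 == "B" then List.replicate (buf ++ tail).length "O" ++ goB "O" (t2 :: rest3)
        else List.replicate (buf ++ tail).length "O" ++ t2 :: goB "O" rest3

-- prev values reachable inside a buffered run
def RP (p : String) : Prop := p = "B" ∨ p = "I" ∨ p = "o" ∨ p = "b" ∨ p = "i"

-- the table looked up at the literal keys a run can reach
theorem va_B : PySem.Dict.getD pyValidAfter "B" [] = ["I", "o", "b"] := rfl
theorem va_I : PySem.Dict.getD pyValidAfter "I" [] = ["I", "o", "b", "O"] := rfl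
theorem va_o : PySem.Dict.getD pyValidAfter "o" [] = ["I", "b", "i"] := rfl
theorem va_b : PySem.Dict.getD pyValidAfter "b" [] = ["I", "i", "o"] := rfl
theorem va_i : PySem.Dict.getD pyValidAfter "i" [] = ["i", "o", "I"] := rfl

theorem valid_RP {p t : String} (hp : RP p) (hv : pvValid p t = true)
    (hne : (t == "B" || t == "O") = false) : RP t := by
  simp only [Bool.or_eq_false_iff, beq_eq_false_iff_ne, ne_eq] at hne
  unfold RP
  rcases hp with h | h | h | h | h <;> subst h <;>
    simp [pvValid, va_B, va_I, va_o, va_b, va_i] at hv <;>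
    tauto

theorem scanB_RP (tags : List String) : ∀ p, RP p → RP (scanB p tags).2.2 := by
  induction tags with
  | nil => intro p hp; simpa [scanB]
  | cons t rest ih =>
    intro p hp
    simp only [scanB]
    split
    · next hcond =>
      rcases h : scanB t rest with ⟨tail, r, pe⟩
      simp only [Bool.and_eq_true, Bool.not_eq_eq_eq_not, Bool.not_true] at hcond
      have := ih t (valid_RP hp hcond.1 hcond.2)
      rw [h] at this
      simpa [h]
    · simpa

theorem RP_valid_O {p : String} (hp : RP p) : pvValid p "O" = (p == "I") := by
  rcases hp with h | h | h | h | h <;> subst h <;> decide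

-- goB on a valid 'B' is exactly bmOut entering the run
theorem goB_run (prev : String) (rest : List String) (hv : pvValid prev "B" = true) :
    goB prev ("B" :: rest) = bmOut "B" ["B"] rest := by
  rw [goB, bmOut]
  rcases h : scanB "B" rest with ⟨tail, rest2, pe⟩
  have hpe : RP pe := by
    have := scanB_RP rest "B" (Or.inl rfl)
    rwa [h] at this
  rcases rest2 with _ | ⟨t2, rest3⟩ <;>
    simp [hv, RP_valid_O hpe]

-- the joint loop invariant: A's fold from a non-buffered state is goB,
-- and from a buffered state is bmOut
theorem main_bm (n : Nat) :
    (∀ tags : List String, tags.length ≤ n → ∀ prev acc,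
        finRun (tags.foldl stepA (acc, [], prev, false)) = acc ++ goB prev tags)
    ∧ (∀ rest : List String, rest.length ≤ n → ∀ p buf acc,
        finRun (rest.foldl stepA (acc, buf, p, true)) = acc ++ bmOut p buf rest) := by
  induction n with
  | zero =>
    constructor
    · intro tags h prev acc
      have : tags = [] := List.eq_nil_of_length_eq_zero (Nat.le_zero.mp h)
      subst this; simp [finRun, goB]
    · intro rest h p buf acc
      have : rest = [] := List.eq_nil_of_length_eq_zero (Nat.le_zero.mp h)
      subst this
      by_cases hO : pvValid p "O" = true <;> simp [finRun, bmOut, scanB, hO]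
  | succ n ih =>
    constructor
    · -- non-buffered mode
      intro tags hlen prev acc
      rcases tags with _ | ⟨t, rest⟩
      · simp [finRun, goB]
      · have hrest : rest.length ≤ n := by simpa using Nat.succ_le_succ_iff.mp hlen
        by_cases hv : pvValid prev t = true
        · by_cases hB : t = "B"
          · subst hB
            have hstep : stepA (acc, [], prev, false) "B" = (acc, ["B"], "B", true) := by
              simp [stepA, hv]
            rw [List.foldl_cons, hstep, (ih.2) rest hrest, goB_run prev rest hv]
          · have hstep : stepA (acc, [], prev, false) t = (acc ++ [t], [], t, false) := by
              simp [stepA, hv, hB]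
            rw [List.foldl_cons, hstep, (ih.1) rest hrest, goB]
            simp [hv, hB]
        · have hv2 : pvValid prev t = false := by simpa using hv
          have hstep : stepA (acc, [], prev, false) t = (acc ++ ["O"], [], "O", false) := by
            simp [stepA, hv2]
          rw [List.foldl_cons, hstep, (ih.1) rest hrest, goB]
          simp [hv2]
    · -- buffered mode
      intro rest hlen p buf acc
      rcases rest with _ | ⟨t, rest'⟩
      · by_cases hO : pvValid p "O" = true <;> simp [finRun, bmOut, scanB, hO]
      · have hrest : rest'.length ≤ n := by simpa using Nat.succ_le_succ_iff.mp hlen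
        by_cases hv : pvValid p t = true
        · by_cases hEnd : (t == "B" || t == "O") = true
          · -- boundary tag: buffer flush
            by_cases hB : t = "B"
            · subst hB
              have hstep : stepA (acc, buf, p, true) "B" = (acc ++ buf, ["B"], "B", true) := by
                simp [stepA, hv]
              have hscan : scanB p ("B" :: rest') = ([], "B" :: rest', p) := by
                simp [scanB, hv]
              rw [List.foldl_cons, hstep, (ih.2) rest' hrest,
                 ← goB_run "O" rest' (by decide)]
              simp [bmOut, hscan, hv, List.append_assoc]
            · have hO : t = "O" := by
                simp only [Bool.or_eq_true, beq_iff_eq] at hEnd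
                tauto
              subst hO
              have hstep : stepA (acc, buf, p, true) "O" = (acc ++ buf ++ ["O"], [], "O", false) := by
                simp [stepA, hv]
              have hscan : scanB p ("O" :: rest') = ([], "O" :: rest', p) := by
                simp [scanB]
              rw [List.foldl_cons, hstep, (ih.1) rest' hrest]
              simp [bmOut, hscan, hv, List.append_assoc]
          · -- interior tag: buffer it
            have hEnd2 : (t == "B" || t == "O") = false := by simpa using hEnd
            have hstep : stepA (acc, buf, p, true) t = (acc, buf ++ [t], t, true) := by
              simp only [Bool.or_eq_true, beq_iff_eq, not_or] at hEnd
              simp [stepA, hv, hEnd.1, hEnd.2]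
            rw [List.foldl_cons, hstep, (ih.2) rest' hrest]
            rcases h : scanB t rest' with ⟨tail, r, pe⟩
            have hscan : scanB p (t :: rest') = (t :: tail, r, pe) := by
              simp [scanB, hv, hEnd2, h]
            rcases r with _ | ⟨t2, rest3⟩ <;>
              simp [bmOut, hscan, h, List.append_assoc]
        · -- invalid tag: buffer overwrite
          have hv2 : pvValid p t = false := by simpa using hv
          have hscan : scanB p (t :: rest') = ([], t :: rest', p) := by
            simp [scanB, hv2]
          by_cases hB : t = "B"
          · subst hB
            have hstep : stepA (acc, buf, p, true) "B" =
                (acc ++ List.replicate buf.length "O", ["B"], "B", true) := by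
              simp [stepA, hv2]
            rw [List.foldl_cons, hstep, (ih.2) rest' hrest,
               ← goB_run "O" rest' (by decide)]
            simp [bmOut, hscan, hv2, List.append_assoc]
          · have hstep : stepA (acc, buf, p, true) t =
                (acc ++ List.replicate buf.length "O" ++ [t], [], "O", false) := by
              simp [stepA, hv2, hB]
            rw [List.foldl_cons, hstep, (ih.1) rest' hrest]
            simp [bmOut, hscan, hv2, hB, List.append_assoc]

-- the sentinel 'O' appends exactly one tag after finalising the pre-sentinel state
theorem sentinel (a b : List String) (p : String) (m : Bool) :
    (stepA (a, b, p, m) "O").1 = finRun (a, b, p, m) ++ ["O"] := by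
  rcases m <;> by_cases hv : pvValid p "O" = true <;>
    simp_all [stepA, finRun]

theorem scanB_sum (p : String) (tags : List String) :
    (scanB p tags).1.length + (scanB p tags).2.1.length = tags.length := by
  induction tags generalizing p with
  | nil => simp [scanB]
  | cons t rest ih =>
    simp only [scanB]
    split
    · have := ih t
      rcases h : scanB t rest with ⟨tail, r, pe⟩
      rw [h] at this
      simp at this ⊢
      omega
    · simp

-- B preserves the length of its input
theorem goB_length_aux (n : Nat) :
    ∀ tags : List String, tags.length ≤ n → ∀ prev, (goB prev tags).length = tags.length := by
  induction n with
  | zero =>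
    intro tags h prev
    have : tags = [] := List.eq_nil_of_length_eq_zero (Nat.le_zero.mp h)
    subst this; simp [goB]
  | succ n ih =>
    intro tags hlen prev
    rcases tags with _ | ⟨t, rest⟩
    · simp [goB]
    · have hrest : rest.length ≤ n := by simpa using Nat.succ_le_succ_iff.mp hlen
      by_cases hv : pvValid prev t = true
      · by_cases hB : t = "B"
        · subst hB
          rw [goB]
          simp only [hv, Bool.not_true, Bool.false_eq_true, if_false, bne_self_eq_false]
          split
          · next tail pe heq =>
            have hsum := scanB_sum "B" rest
            rw [heq] at hsum
            simp only [List.length_nil, Nat.add_zero] at hsum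
            by_cases hI : (pe == "I") = true <;> simp [hI] <;> omega
          · next tail t2 rest3 pe heq =>
            have hsum := scanB_sum "B" rest
            rw [heq] at hsum
            simp only [List.length_cons] at hsum
            have h3 : rest3.length ≤ n := by omega
            have h2 : (t2 :: rest3).length ≤ n := by simp; omega
            by_cases hvv : pvValid pe t2 = true <;> by_cases hb2 : (t2 == "B") = true <;>
              simp [hvv, hb2, ih _ h3, ih _ h2] <;> omega
        · rw [goB]; simp [hv, hB, ih rest hrest]
      · have hv2 : pvValid prev t = false := by simpa using hv
        rw [goB]; simp [hv2, ih rest hrest]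

-- ===== VERDICT (by name: the statement is the Claim_ definition above) =====
theorem validate_iob_spec : Claim_equal_validate_iob := by
  intro iobs _
  unfold Spec_validate_iob validate_iob validate_iob_alt
  rcases hfold : iobs.foldl stepA ([], [], "O", false) with ⟨a, b, p, m⟩
  have hmain := (main_bm iobs.length).1 iobs le_rfl "O" []
  rw [hfold] at hmain
  simp only [List.nil_append] at hmain
  have hfull : (iobs ++ ["O"]).foldl stepA ([], [], "O", false) =
      ((stepA (a, b, p, m) "O").1, (stepA (a, b, p, m) "O").2.1,
       (stepA (a, b, p, m) "O").2.2.1, (stepA (a, b, p, m) "O").2.2.2) := by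
    rw [List.foldl_append, hfold, List.foldl_cons, List.foldl_nil]
  rw [hfull]
  simp only
  rw [sentinel a b p m, hmain]
  have hlen : (goB "O" iobs).length = iobs.length := goB_length_aux iobs.length iobs le_rfl "O"
  simp [hlen]
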